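-- pv_equiv track=rewrite | github.com/simranmahindrakar/DAA-things | MYLAP.py | lapindrome
-- ===== SOURCE A (Python) =====
-- def lapindrome(s):
--     n=len(s)
--     mid=len(s)//2
--     if (len(s)%2==0):
--         sl=s[:mid]
--         sr=s[mid:]
--         for i in range (len(sl)):
--             if(sl.count(sl[i])!=sr.count(sl[i])):
--                 return "NO"
--     else:
--         sl=s[:mid]
--         sr=s[mid+1:]
--         for i in range(len(sl)):
--             if(sl.count(sl[i])!=sr.count(sl[i])):
--                 return "NO"
--
--     return "YES"
-- ===== SOURCE B (Python) =====
-- def lapindrome(s):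
--     mid = len(s) // 2
--     left = s[:mid]
--     right = s[mid:] if len(s) % 2 == 0 else s[mid+1:]
--     return "YES" if sorted(left) == sorted(right) else "NO"
-- ===== Notes on version B (the rewrite author's own statement) =====
-- stated objective: simpler
-- what changed: Replaces the per-index loop that rescans both halves with .count for every character by a single sort of each half and one list comparison.
import Mathlib
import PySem

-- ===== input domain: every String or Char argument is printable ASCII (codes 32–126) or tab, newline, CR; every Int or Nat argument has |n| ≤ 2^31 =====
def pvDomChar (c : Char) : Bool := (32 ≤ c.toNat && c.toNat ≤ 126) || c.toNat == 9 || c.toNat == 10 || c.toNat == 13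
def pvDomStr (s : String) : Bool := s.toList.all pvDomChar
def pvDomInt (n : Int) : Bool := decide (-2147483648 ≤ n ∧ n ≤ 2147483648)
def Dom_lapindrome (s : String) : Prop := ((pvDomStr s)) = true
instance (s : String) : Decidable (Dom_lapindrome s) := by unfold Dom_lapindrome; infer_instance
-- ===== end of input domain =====

-- B replaces A's per-index loop (rescanning both halves with .count for each character) by sorting each half once and comparing.


-- ===== PORT A =====
-- the 'for i in range(len(sl)): if sl.count(sl[i]) != sr.count(sl[i]): return "NO"' loop (shared by both branches), then 'return "YES"'
def lapLoop (sl sr : List Char) : List Int → String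
  | [] => "YES"
  | i :: rest =>
      if PySem.Chars.count sl [PySem.List.pyGetD sl i ' '] ≠ PySem.Chars.count sr [PySem.List.pyGetD sl i ' '] then "NO"
      else lapLoop sl sr rest

def lapindrome (s : String) : String :=
  let cs := s.toList
  let n : Int := PySem.Str.len s
  let mid : Int := PySem.Int.floordiv n 2
  if PySem.Int.mod n 2 = 0 then
    let sl := PySem.List.slice cs none (some mid)
    let sr := PySem.List.slice cs (some mid) none
    lapLoop sl sr (PySem.List.pyRange 0 (PySem.List.len sl) 1)
  else
    let sl := PySem.List.slice cs none (some mid)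
    let sr := PySem.List.slice cs (some (mid + 1)) none
    lapLoop sl sr (PySem.List.pyRange 0 (PySem.List.len sl) 1)

-- ===== PORT B =====
def lapindrome_alt (s : String) : String :=
  let cs := s.toList
  let mid : Int := PySem.Int.floordiv (PySem.Str.len s) 2
  let left := PySem.List.slice cs none (some mid)
  let right := if PySem.Int.mod (PySem.Str.len s) 2 = 0
    then PySem.List.slice cs (some mid) none
    else PySem.List.slice cs (some (mid + 1)) none
  if PySem.List.sorted left (fun c => c) false = PySem.List.sorted right (fun c => c) false then "YES" else "NO"

-- ===== PRECONDITION & SPEC =====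
def Spec_lapindrome (s : String) (out : String) : Prop := out = lapindrome_alt s
instance (s : String) (out : String) : Decidable (Spec_lapindrome s out) := by unfold Spec_lapindrome; infer_instance

-- ===== CLAIM (what is proved, stated in full; the proofs are below) =====
def Claim_equal_lapindrome : Prop := ∀ (s : String), Dom_lapindrome s → Spec_lapindrome s (lapindrome s)

-- ===== LEMMAS AND PROOFS =====

-- Python str.count with a one-character needle is plain character count
theorem chars_count_go_single (c : Char) : ∀ (l : List Char) (fuel acc : ℕ), l.length ≤ fuel →
    PySem.Chars.count.go [c] fuel l acc = acc + l.count c := by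
  intro l
  induction l with
  | nil => intro fuel acc h; cases fuel <;> simp [PySem.Chars.count.go]
  | cons x t ih =>
    intro fuel acc h
    cases fuel with
    | zero => simp at h
    | succ f =>
      simp only [PySem.Chars.count.go]
      simp only [List.length_cons] at h
      by_cases hc : c = x
      · subst hc
        simp only [List.isPrefixOf, beq_self_eq_true, Bool.true_and, if_pos,
          List.length_singleton, List.drop_succ_cons, List.drop_zero]
        rw [ih f (acc + 1) (by omega)]
        simp; omega
      · simp [List.isPrefixOf, hc]
        rw [ih f acc (by omega)]
        rw [List.count_cons_of_ne (Ne.symm hc)]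

theorem chars_count_single (cs : List Char) (c : Char) : PySem.Chars.count cs [c] = cs.count c := by
  simp [PySem.Chars.count, chars_count_go_single c cs cs.length 0 le_rfl]

-- A's early-exit loop returns "NO" iff some visited character has mismatching counts
theorem lapLoop_eq (sl sr : List Char) (idxs : List Int) :
    lapLoop sl sr idxs =
      if ∀ i ∈ idxs, PySem.Chars.count sl [PySem.List.pyGetD sl i ' ']
          = PySem.Chars.count sr [PySem.List.pyGetD sl i ' '] then "YES" else "NO" := by
  induction idxs with
  | nil => simp [lapLoop]
  | cons i rest ih =>
    simp only [lapLoop, ih]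
    by_cases h : PySem.Chars.count sl [PySem.List.pyGetD sl i ' ']
        = PySem.Chars.count sr [PySem.List.pyGetD sl i ' ']
    · simp [h]
    · simp [h]

-- equal per-character counts on members + equal lengths ⇒ permutation
theorem perm_of_counts (sl sr : List Char) (h : sl.length = sr.length)
    (hc : ∀ c ∈ sl, sl.count c = sr.count c) : sl.Perm sr := by
  rw [List.perm_iff_count]
  intro c
  by_cases hm : c ∈ sl
  · exact hc c hm
  · rw [List.count_eq_zero_of_not_mem hm]
    by_contra hne
    have hcr : c ∈ sr := by
      by_contra hx; exact hne ((List.count_eq_zero_of_not_mem hx).symm)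
    have hsum1 : ∑ x ∈ sl.toFinset, sl.count x = sl.length := by
      simp
    have hsum2 : ∑ x ∈ sr.toFinset, sr.count x = sr.length := by
      simp
    have heq : ∑ x ∈ sl.toFinset, sl.count x = ∑ x ∈ sl.toFinset, sr.count x :=
      Finset.sum_congr rfl (fun x hx => hc x (List.mem_toFinset.mp hx))
    have hnotin : c ∉ sl.toFinset := fun hx => hm (List.mem_toFinset.mp hx)
    have hle : ∑ x ∈ insert c sl.toFinset, sr.count x ≤ ∑ x ∈ sr.toFinset, sr.count x := by
      apply Finset.sum_le_sum_of_ne_zero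
      intro x _ hx0
      exact List.mem_toFinset.mpr (List.count_pos_iff.mp (Nat.pos_of_ne_zero hx0))
    rw [Finset.sum_insert hnotin] at hle
    have hcpos : 0 < sr.count c := List.count_pos_iff.mpr hcr
    omega

-- A's loop condition over range(len(sl)) is exactly "same multiset" when lengths agree
theorem cond_iff_perm (sl sr : List Char) (h : sl.length = sr.length) :
    (∀ i ∈ PySem.List.pyRange 0 (sl.length : Int) 1,
        PySem.Chars.count sl [PySem.List.pyGetD sl i ' ']
          = PySem.Chars.count sr [PySem.List.pyGetD sl i ' ']) ↔ sl.Perm sr := by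
  constructor
  · intro hall
    apply perm_of_counts sl sr h
    intro c hm
    obtain ⟨k, hk, hget⟩ := List.mem_iff_getElem.mp hm
    have hmem : (k : Int) ∈ PySem.List.pyRange 0 (sl.length : Int) 1 := by
      rw [PySem.List.mem_pyRange_one]; exact ⟨Int.natCast_nonneg k, by exact_mod_cast hk⟩
    have := hall (k : Int) hmem
    rwa [PySem.List.pyGetD_natCast, List.getD_eq_getElem sl ' ' hk, hget,
      chars_count_single, chars_count_single] at this
  · intro hperm i hi
    rw [PySem.List.mem_pyRange_one] at hi
    obtain ⟨h0, hlt⟩ := hi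
    have hk : i.toNat < sl.length := by omega
    rw [chars_count_single, chars_count_single]
    have : PySem.List.pyGetD sl i ' ' ∈ sl := by
      rw [PySem.List.pyGetD_of_nonneg sl ' ' h0, List.getD_eq_getElem sl ' ' hk]
      exact List.getElem_mem hk
    exact List.Perm.count_eq hperm _

theorem core (sl sr : List Char) (h : sl.length = sr.length) :
    lapLoop sl sr (PySem.List.pyRange 0 (sl.length : Int) 1)
      = if PySem.List.sorted sl (fun c => c) false = PySem.List.sorted sr (fun c => c) false
        then "YES" else "NO" := by
  rw [lapLoop_eq]
  by_cases hp : sl.Perm sr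
  · rw [if_pos ((cond_iff_perm sl sr h).mpr hp),
      if_pos ((PySem.List.sorted_id_eq_sorted_id_iff_perm sl sr).mpr hp)]
  · rw [if_neg (fun hall => hp ((cond_iff_perm sl sr h).mp hall)),
      if_neg (fun hs => hp ((PySem.List.sorted_id_eq_sorted_id_iff_perm sl sr).mp hs))]

-- ===== VERDICT (by name: the statement is the Claim_ definition above) =====
theorem lapindrome_spec : Claim_equal_lapindrome := by
  intro s _
  unfold Spec_lapindrome lapindrome lapindrome_alt
  set cs := s.toList with hcs
  have hlen : PySem.Str.len s = (cs.length : Int) := by simp [PySem.Str.len_eq, hcs]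
  simp only [hlen]
  have hmid : PySem.Int.floordiv (cs.length : Int) 2 = ((cs.length / 2 : Nat) : Int) := by
    exact_mod_cast PySem.Int.floordiv_natCast cs.length 2
  have hmod : PySem.Int.mod (cs.length : Int) 2 = ((cs.length % 2 : Nat) : Int) := by
    exact_mod_cast PySem.Int.mod_natCast cs.length 2
  simp only [hmid, hmod]
  by_cases hpar : cs.length % 2 = 0
  · have hparI : ((cs.length % 2 : Nat) : Int) = 0 := by exact_mod_cast hpar
    rw [if_pos hparI]
    rw [PySem.List.slice_to_natCast, PySem.List.slice_from_natCast]
    have hl : (cs.take (cs.length / 2)).length = cs.length / 2 := by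
      simp [Nat.div_le_self]
    have h : (cs.take (cs.length / 2)).length = (cs.drop (cs.length / 2)).length := by
      simp [hl]; omega
    rw [show PySem.List.len (cs.take (cs.length / 2)) = ((cs.take (cs.length / 2)).length : Int) by
      simp [PySem.List.len_eq]]
    rw [if_pos hparI]
    exact core _ _ h
  · have hparN : ¬ ((cs.length % 2 : Nat) : Int) = 0 := by exact_mod_cast hpar
    rw [if_neg hparN]
    rw [PySem.List.slice_to_natCast]
    rw [show ((cs.length / 2 : Nat) : Int) + 1 = ((cs.length / 2 + 1 : Nat) : Int) by push_cast; ring]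
    rw [PySem.List.slice_from_natCast]
    have hl : (cs.take (cs.length / 2)).length = cs.length / 2 := by
      simp [Nat.div_le_self]
    have h : (cs.take (cs.length / 2)).length = (cs.drop (cs.length / 2 + 1)).length := by
      simp [hl]; omega
    rw [show PySem.List.len (cs.take (cs.length / 2)) = ((cs.take (cs.length / 2)).length : Int) by
      simp [PySem.List.len_eq]]
    rw [if_neg hparN]
    exact core _ _ h
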